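-- pv_equiv track=rewrite | github.com/NathanSnail/data_utils | wak.py | str_gt
-- ===== SOURCE A (Python) =====
-- def str_gt(a: str, b: str) -> bool:
--     if len(a) == 0 or len(b) == 0:
--         return a > b
--     if a[0] == "_" and b[0] != "_":
--         return True
--     if a[0] != "_" and b[0] == "_":
--         return False
--     if a[0] == b[0]:
--         return str_gt(a[1:], b[1:])
--     return a > b
-- ===== SOURCE B (Python) =====
-- def str_gt(a: str, b: str) -> bool:
--     for ca, cb in zip(a, b):
--         if ca == cb:
--             continue
--         if ca == "_":
--             return True
--         if cb == "_":
--             return False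
--         return ca > cb
--     return len(a) > len(b)
-- ===== Notes on version B (the rewrite author's own statement) =====
-- stated objective: faster
-- what changed: Replaced the recursion that slices both strings each step (quadratic copying) with a single flat pass over the zipped characters that decides at the first mismatch and falls back to a length comparison.
import Mathlib
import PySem

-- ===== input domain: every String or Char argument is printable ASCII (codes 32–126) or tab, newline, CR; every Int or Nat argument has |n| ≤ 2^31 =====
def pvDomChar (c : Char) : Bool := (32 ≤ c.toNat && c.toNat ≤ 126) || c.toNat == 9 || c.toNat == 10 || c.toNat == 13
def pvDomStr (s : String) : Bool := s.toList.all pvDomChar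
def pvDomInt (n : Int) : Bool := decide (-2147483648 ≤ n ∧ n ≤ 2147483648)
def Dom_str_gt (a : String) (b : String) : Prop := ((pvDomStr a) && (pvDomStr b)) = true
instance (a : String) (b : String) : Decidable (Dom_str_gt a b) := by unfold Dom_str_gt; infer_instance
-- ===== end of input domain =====

-- B replaces A's recursion with repeated slicing by one flat pass over the zipped characters (faster: asymptotic).

-- ===== PORT A =====
-- A's recursion on the character lists: empty check, '_' rules on the heads, recurse on the tails
-- (a[1:], b[1:]), and Python's string '>' (code-point lexicographic, a > b = b < a) as fallback.
def strGtGoA : List Char → List Char → Bool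
  | [], b => decide (b < ([] : List Char))
  | a@(_ :: _), [] => decide (([] : List Char) < a)
  | x :: a', y :: b' =>
    if x = '_' ∧ y ≠ '_' then true
    else if x ≠ '_' ∧ y = '_' then false
    else if x = y then strGtGoA a' b'
    else decide ((y :: b') < (x :: a'))

def str_gt (a : String) (b : String) : Bool := strGtGoA a.toList b.toList

-- ===== PORT B =====
-- B's single pass: walk the zipped character pairs, decide at the first mismatch ('some'),
-- otherwise fall back to comparing the lengths.
def strGtGoB : List (Char × Char) → Option Bool
  | [] => none
  | (ca, cb) :: rest =>
    if ca = cb then strGtGoB rest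
    else if ca = '_' then some true
    else if cb = '_' then some false
    else some (decide (cb < ca))

def str_gt_alt (a : String) (b : String) : Bool :=
  (strGtGoB (a.toList.zip b.toList)).getD (decide (b.toList.length < a.toList.length))

-- ===== PRECONDITION & SPEC =====
def Spec_str_gt (a : String) (b : String) (out : Bool) : Prop := out = str_gt_alt a b
instance (a : String) (b : String) (out : Bool) : Decidable (Spec_str_gt a b out) := by unfold Spec_str_gt; infer_instance

-- ===== CLAIM (what is proved, stated in full; the proofs are below) =====
def Claim_equal_str_gt : Prop := ∀ (a : String) (b : String), Dom_str_gt a b → Spec_str_gt a b (str_gt a b)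

-- ===== LEMMAS AND PROOFS =====

theorem cons_lt_cons_iff_of_ne (x y : Char) (a' b' : List Char) (h : x ≠ y) :
    ((y :: b') < (x :: a')) ↔ y < x := by
  constructor
  · intro hlt
    cases hlt with
    | cons _ => exact absurd rfl h.symm
    | rel hr => exact hr
  · intro hr
    exact List.Lex.rel hr

theorem strGt_go_eq (a b : List Char) :
    strGtGoA a b = (strGtGoB (a.zip b)).getD (decide (b.length < a.length)) := by
  induction a generalizing b with
  | nil =>
    simp [strGtGoA, strGtGoB]
  | cons x a' ih =>
    cases b with
    | nil =>
      simp [strGtGoA, strGtGoB]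
    | cons y b' =>
      by_cases hxy : x = y
      · subst hxy
        simp [strGtGoA, strGtGoB, ih b']
      · simp only [strGtGoA, List.zip_cons_cons, strGtGoB, if_neg hxy]
        by_cases hx : x = '_'
        · by_cases hy : y = '_'
          · exact absurd (hx.trans hy.symm) hxy
          · simp [hx, hy]
        · by_cases hy : y = '_'
          · simp [hx, hy]
          · simp [hx, hy, cons_lt_cons_iff_of_ne x y a' b' hxy]

-- ===== VERDICT (by name: the statement is the Claim_ definition above) =====
theorem str_gt_spec : Claim_equal_str_gt := by
  intro a b _
  unfold Spec_str_gt str_gt str_gt_alt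
  exact strGt_go_eq a.toList b.toList
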